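-- pv_equiv track=rewrite | github.com/Uchada1124/InformationSystem | Python/Regression/feature_selection_cv.py | get_feature_pairs
-- ===== SOURCE A (Python) =====
-- def get_feature_pairs(features):
--     feature_pairs = []
--     n = len(features)
--
--     for i in range(1, 2**n):
--         if bin(i).count("1") == 2:
--             pair = [features[j] for j in range(n) if (i >> j) & 1]
--             feature_pairs.append(pair)
--
--     return feature_pairs
-- ===== SOURCE B (Python) =====
-- def get_feature_pairs(features):
--     n = len(features)
--     return [[features[a], features[b]] for b in range(1, n) for a in range(b)]
-- ===== Notes on version B (the rewrite author's own statement) =====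
-- stated objective: faster
-- what changed: Replaces the enumeration of all 2^n bitmasks (keeping those with popcount 2 and rescanning all n bits for each) with a direct double loop over the high index b and low index a<b, emitting [features[a], features[b]] in the same order.
import Mathlib
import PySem

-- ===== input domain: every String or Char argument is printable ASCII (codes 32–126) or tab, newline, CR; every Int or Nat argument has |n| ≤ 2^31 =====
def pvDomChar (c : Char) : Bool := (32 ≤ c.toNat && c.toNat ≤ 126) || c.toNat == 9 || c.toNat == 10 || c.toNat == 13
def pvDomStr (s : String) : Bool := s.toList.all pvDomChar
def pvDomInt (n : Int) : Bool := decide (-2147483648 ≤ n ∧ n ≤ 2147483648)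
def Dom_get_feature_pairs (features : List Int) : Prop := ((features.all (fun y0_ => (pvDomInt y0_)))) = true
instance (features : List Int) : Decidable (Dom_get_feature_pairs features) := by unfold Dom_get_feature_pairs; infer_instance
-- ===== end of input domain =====

-- B replaces A's scan of all 2^n bitmasks (keeping popcount-2 masks and rescanning all n bits
-- for each) by a direct double loop over the high index b and low index a < b, same output order.

-- ===== PORT A =====
-- bin(i).count("1") for i ≥ 1 is exactly i.bit_count() = PySem.Int.bitCount i (exact here: every i in range(1, 2**n) is positive).
-- (i >> j) & 1 with j from range(n): j ≥ 0, so the shift amount is j.toNat; features[j] is in range, ported as pyGetD.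
def get_feature_pairs (features : List Int) : List (List Int) :=
  let n := features.length
  (PySem.List.pyRange 1 (2 ^ n) 1).foldl (fun acc i =>
    if PySem.Int.bitCount i == 2 then
      acc ++ [((PySem.List.pyRange 0 (n : Int) 1).filter
                  (fun j => PySem.Int.band (i >>> j.toNat) 1 != 0)).map
                (fun j => PySem.List.pyGetD features j 0)]
    else acc) []

-- ===== PORT B =====
-- [[features[a], features[b]] for b in range(1, n) for a in range(b)]; indices are in range, ported as pyGetD.
def get_feature_pairs_alt (features : List Int) : List (List Int) :=
  let n := features.length
  (PySem.List.pyRange 1 (n : Int) 1).flatMap (fun b =>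
    (PySem.List.pyRange 0 b 1).map (fun a =>
      [PySem.List.pyGetD features a 0, PySem.List.pyGetD features b 0]))

-- ===== PRECONDITION & SPEC =====
def Spec_get_feature_pairs (features : List Int) (out : List (List Int)) : Prop := out = get_feature_pairs_alt features
instance (features : List Int) (out : List (List Int)) : Decidable (Spec_get_feature_pairs features out) := by unfold Spec_get_feature_pairs; infer_instance

-- ===== CLAIM (what is proved, stated in full; the proofs are below) =====
def Claim_equal_get_feature_pairs : Prop := ∀ (features : List Int), Dom_get_feature_pairs features → Spec_get_feature_pairs features (get_feature_pairs features)

-- ===== LEMMAS AND PROOFS =====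

lemma pv_pc_add (n k : Nat) (h : k < 2 ^ n) :
    PySem.Int.bitCount ((2 ^ n + k : Nat) : Int) = PySem.Int.bitCount (k : Int) + 1 := by
  induction n generalizing k with
  | zero =>
    interval_cases k
    decide
  | succ n ih =>
    have h2 : 2 ^ (n + 1) = 2 * 2 ^ n := by ring
    rw [PySem.Int.bitCount_natCast (by positivity)]
    have hd : (2 ^ (n + 1) + k) / 2 = 2 ^ n + k / 2 := by omega
    have hm : (2 ^ (n + 1) + k) % 2 = k % 2 := by omega
    rw [hd, hm, ih (k / 2) (by omega)]
    rcases Nat.eq_zero_or_pos k with hk | hk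
    · subst hk; simp
    · rw [PySem.Int.bitCount_natCast hk]
      omega

lemma pv_pc_pos (k : Nat) (h : 0 < k) : 0 < PySem.Int.bitCount (k : Int) := by
  induction k using Nat.strong_induction_on with
  | _ k ih =>
    rw [PySem.Int.bitCount_natCast h]
    rcases Nat.eq_zero_or_pos (k % 2) with hm | hm
    · have : 0 < k / 2 := by omega
      have := ih (k / 2) (by omega) this
      omega
    · omega

lemma pv_ones (n : Nat) :
    (List.range (2 ^ n)).filter (fun (m : Nat) => PySem.Int.bitCount (m : Int) == 1) =
      (List.range n).map (fun a => 2 ^ a) := by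
  induction n with
  | zero => decide
  | succ n ih =>
    have h2 : 2 ^ (n + 1) = 2 ^ n + 2 ^ n := by ring
    rw [h2, List.range_add, List.filter_append, ih, List.filter_map]
    have hc : ∀ k ∈ List.range (2 ^ n),
        ((fun (m : Nat) => PySem.Int.bitCount (m : Int) == 1) ∘ (fun x => 2 ^ n + x)) k
          = (fun k => k == 0) k := by
      intro k hk
      simp only [Function.comp, List.mem_range] at *
      rw [pv_pc_add n k hk]
      rcases Nat.eq_zero_or_pos k with h | h
      · subst h; decide
      · have := pv_pc_pos k h
        rw [Bool.eq_iff_iff]; simp only [beq_iff_eq]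
        omega
    rw [List.filter_congr hc]
    have hz : (List.range (2 ^ n)).filter (fun k => k == 0) = [0] := by
      have : 2 ^ n = (2 ^ n - 1) + 1 := by have := Nat.one_le_two_pow (n := n); omega
      rw [this, List.range_succ_eq_map]
      simp
    rw [hz, List.range_succ, List.map_append]
    simp

lemma pv_twos (n : Nat) :
    (List.range (2 ^ n)).filter (fun (m : Nat) => PySem.Int.bitCount (m : Int) == 2) =
      (List.range n).flatMap (fun b => (List.range b).map (fun a => 2 ^ a + 2 ^ b)) := by
  induction n with
  | zero => decide
  | succ n ih =>
    have h2 : 2 ^ (n + 1) = 2 ^ n + 2 ^ n := by ring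
    rw [h2, List.range_add, List.filter_append, ih, List.filter_map]
    have hc : ∀ k ∈ List.range (2 ^ n),
        ((fun (m : Nat) => PySem.Int.bitCount (m : Int) == 2) ∘ (fun x => 2 ^ n + x)) k
          = (fun (m : Nat) => PySem.Int.bitCount (m : Int) == 1) k := by
      intro k hk
      simp only [Function.comp, List.mem_range] at *
      rw [pv_pc_add n k hk]
      rw [Bool.eq_iff_iff]; simp only [beq_iff_eq]
      omega
    rw [List.filter_congr hc, pv_ones, List.map_map, List.range_succ, List.flatMap_append]
    simp only [List.flatMap_cons, List.flatMap_nil, List.append_nil]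
    congr 1
    exact List.map_congr_left (fun a _ => by simp only [Function.comp_apply]; omega)

lemma pv_bit (a b j : Nat) (hab : a < b) :
    ((((2 ^ a + 2 ^ b : Nat) >>> j) &&& 1) != 0) = (j == a || j == b) := by
  rw [Nat.shiftRight_eq_div_pow, Nat.and_one_is_mod]
  have key : (2 ^ a + 2 ^ b) / 2 ^ j % 2 = if j = a ∨ j = b then 1 else 0 := by
    by_cases hja : j ≤ a
    · have hd : 2 ^ a + 2 ^ b = (2 ^ (a - j) + 2 ^ (b - j)) * 2 ^ j := by
        rw [Nat.add_mul, ← pow_add, ← pow_add]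
        congr 2 <;> omega
      rw [hd, Nat.mul_div_cancel _ (by positivity)]
      rcases Nat.lt_or_ge j a with hja' | hja'
      · have h1 : 2 ^ (a - j) % 2 = 0 := by
          have : a - j = (a - j - 1) + 1 := by omega
          rw [this, pow_succ]; omega
        have h2 : 2 ^ (b - j) % 2 = 0 := by
          have : b - j = (b - j - 1) + 1 := by omega
          rw [this, pow_succ]; omega
        have : ¬ (j = a ∨ j = b) := by omega
        rw [if_neg this]; omega
      · have hja2 : j = a := by omega
        have h2 : 2 ^ (b - j) % 2 = 0 := by
          have : b - j = (b - j - 1) + 1 := by omega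
          rw [this, pow_succ]; omega
        have hsub : a - j = 0 := by omega
        rw [hsub, if_pos (Or.inl hja2), pow_zero]
        omega
    · by_cases hjb : j ≤ b
      · have hd : 2 ^ a + 2 ^ b = 2 ^ a + 2 ^ (b - j) * 2 ^ j := by
          have hb : b - j + j = b := by omega
          rw [← pow_add, hb]
        have hlt : 2 ^ a < 2 ^ j := Nat.pow_lt_pow_right (by omega) (by omega)
        rw [hd, Nat.add_mul_div_right _ _ (by positivity), Nat.div_eq_of_lt hlt]
        rcases Nat.lt_or_ge j b with hjb' | hjb'
        · have h2 : 2 ^ (b - j) % 2 = 0 := by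
            have : b - j = (b - j - 1) + 1 := by omega
            rw [this, pow_succ]; omega
          have : ¬ (j = a ∨ j = b) := by omega
          rw [if_neg this]; omega
        · have hjb2 : j = b := by omega
          have hbj : b - j = 0 := by omega
          rw [hbj, if_pos (Or.inr hjb2), pow_zero]
          omega
      · have hlt : 2 ^ a + 2 ^ b < 2 ^ j := by
          have h1 : 2 ^ a < 2 ^ (j - 1) := Nat.pow_lt_pow_right (by omega) (by omega)
          have h2 : 2 ^ b ≤ 2 ^ (j - 1) := Nat.pow_le_pow_right (by omega) (by omega)
          have h3 : 2 ^ (j - 1) + 2 ^ (j - 1) ≤ 2 ^ j := by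
            have hp : (2:Nat) ^ (j - 1) * 2 = 2 ^ (j - 1 + 1) := (pow_succ 2 (j - 1)).symm
            have hj : j - 1 + 1 = j := by omega
            rw [hj] at hp
            omega
          omega
        rw [Nat.div_eq_of_lt hlt]
        have : ¬ (j = a ∨ j = b) := by omega
        rw [if_neg this]
  rw [key, Bool.eq_iff_iff]
  by_cases h : j = a ∨ j = b
  · rw [if_pos h]
    simp only [bne_iff_ne, ne_eq, Bool.or_eq_true, beq_iff_eq]
    exact ⟨fun _ => h, fun _ => one_ne_zero⟩
  · rw [if_neg h]
    simp only [bne_iff_ne, ne_eq, Bool.or_eq_true, beq_iff_eq]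
    simp [h]

lemma pv_filter_single (a n : Nat) (h : a < n) :
    (List.range n).filter (fun j => j == a) = [a] := by
  induction n with
  | zero => omega
  | succ n ih =>
    rw [List.range_succ, List.filter_append]
    by_cases han : a = n
    · subst han
      have : (List.range a).filter (fun j => j == a) = [] := by
        rw [List.filter_eq_nil_iff]
        intro x hx
        simp only [List.mem_range] at hx
        simp only [beq_iff_eq]; omega
      rw [this]; simp
    · rw [ih (by omega)]
      have : (List.filter (fun j => j == a) [n]) = [] := by
        simp only [List.filter_cons, List.filter_nil]
        rw [if_neg (by simp only [beq_iff_eq]; omega)]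
      rw [this]; simp

lemma pv_filter_two (a b n : Nat) (hab : a < b) (hbn : b < n) :
    (List.range n).filter (fun j => j == a || j == b) = [a, b] := by
  induction n with
  | zero => omega
  | succ n ih =>
    rw [List.range_succ, List.filter_append]
    by_cases hbn' : b = n
    · subst hbn'
      have h1 : (List.range b).filter (fun j => j == a || j == b) =
          (List.range b).filter (fun j => j == a) := by
        apply List.filter_congr
        intro x hx
        simp only [List.mem_range] at hx
        simp only [Bool.or_eq_left_iff_imp, beq_iff_eq]
        omega
      rw [h1, pv_filter_single a b hab]
      simp
    · rw [ih (by omega)]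
      have : (List.filter (fun j => j == a || j == b) [n]) = [] := by
        simp only [List.filter_cons, List.filter_nil]
        rw [if_neg (by simp only [Bool.or_eq_true, beq_iff_eq]; omega)]
      rw [this]; simp

lemma pv_pair (features : List Int) (a b : Nat) (hab : a < b) (hbn : b < features.length) :
    (((List.range features.length).map (fun (k : Nat) => (k : Int))).filter
        (fun j => PySem.Int.band (((2 ^ a + 2 ^ b : Nat) : Int) >>> j.toNat) 1 != 0)).map
      (fun j => PySem.List.pyGetD features j 0)
    = [features.getD a 0, features.getD b 0] := by
  rw [List.filter_map]
  rw [List.filter_congr (q := fun j : Nat => j == a || j == b) ?hq]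
  case hq =>
    intro j hj
    simp only [Function.comp_apply, Int.toNat_natCast]
    rw [← pv_bit a b j hab, Bool.eq_iff_iff]
    rw [show ((2 ^ a + 2 ^ b : Nat) : Int) >>> ((j : Nat) : Int) = (((2 ^ a + 2 ^ b) >>> j : Nat) : Int) by
      exact_mod_cast Int.shiftRight_natCast (2 ^ a + 2 ^ b) j]
    rw [show (1 : Int) = ((1 : Nat) : Int) from rfl, PySem.Int.band_natCast]
    simp only [bne_iff_ne, ne_eq, Nat.cast_eq_zero]
  rw [pv_filter_two a b _ hab hbn]
  simp

lemma pv_main (features : List Int) : get_feature_pairs features = get_feature_pairs_alt features := by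
  simp only [get_feature_pairs, get_feature_pairs_alt]
  rw [PySem.List.foldl_append_if, List.nil_append]
  have hcast : (2 : Int) ^ features.length = ((2 ^ features.length : Nat) : Int) := by push_cast; ring
  have hpos : (0 : Int) < ((2 ^ features.length : Nat) : Int) := by
    exact_mod_cast Nat.two_pow_pos features.length
  -- A's filtered mask list, seen at the Nat level
  have h1 : (PySem.List.pyRange 1 ((2 : Int) ^ features.length) 1).filter
        (fun i => PySem.Int.bitCount i == 2)
      = ((List.range (2 ^ features.length)).filter
          (fun (m : Nat) => PySem.Int.bitCount (m : Int) == 2)).map (fun (k : Nat) => (k : Int)) := by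
    rw [hcast]
    calc (PySem.List.pyRange 1 ((2 ^ features.length : Nat) : Int) 1).filter
          (fun i => PySem.Int.bitCount i == 2)
        = (PySem.List.pyRange 0 ((2 ^ features.length : Nat) : Int) 1).filter
          (fun i => PySem.Int.bitCount i == 2) := by
          rw [PySem.List.pyRange_one_cons hpos, List.filter_cons]
          norm_num [PySem.Int.bitCount_zero]
      _ = ((List.range (2 ^ features.length)).map (fun (k : Nat) => (k : Int))).filter
          (fun i => PySem.Int.bitCount i == 2) := by rw [PySem.List.pyRange_zero_nat]
      _ = ((List.range (2 ^ features.length)).filter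
          (fun (m : Nat) => PySem.Int.bitCount (m : Int) == 2)).map (fun (k : Nat) => (k : Int)) :=
          List.filter_map
  rw [h1, pv_twos, List.map_map, List.map_flatMap]
  -- B side: prepend the empty b = 0 block and go to the Nat level
  rcases Nat.eq_zero_or_pos features.length with hn0 | hn0
  · rw [hn0]
    simp
  · have hposn : (0 : Int) < (features.length : Int) := by exact_mod_cast hn0
    have econs : PySem.List.pyRange 0 (features.length : Int) 1
        = 0 :: PySem.List.pyRange 1 (features.length : Int) 1 := by
      rw [PySem.List.pyRange_one_cons hposn]; norm_num
    have h2 : (PySem.List.pyRange 1 (features.length : Int) 1).flatMap (fun b =>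
          (PySem.List.pyRange 0 b 1).map (fun a =>
            [PySem.List.pyGetD features a 0, PySem.List.pyGetD features b 0]))
        = (List.range features.length).flatMap (fun (b : Nat) =>
            (PySem.List.pyRange 0 (b : Int) 1).map (fun a =>
              [PySem.List.pyGetD features a 0, PySem.List.pyGetD features (b : Int) 0])) := by
      have hsplit : (PySem.List.pyRange 0 (features.length : Int) 1).flatMap (fun b =>
            (PySem.List.pyRange 0 b 1).map (fun a =>
              [PySem.List.pyGetD features a 0, PySem.List.pyGetD features b 0]))
          = (PySem.List.pyRange 1 (features.length : Int) 1).flatMap (fun b =>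
            (PySem.List.pyRange 0 b 1).map (fun a =>
              [PySem.List.pyGetD features a 0, PySem.List.pyGetD features b 0])) := by
        rw [econs, List.flatMap_cons, PySem.List.pyRange_one_eq_nil (le_refl (0 : Int))]
        simp
      rw [← hsplit, PySem.List.pyRange_zero_nat, List.flatMap_map]
    rw [h2]
    apply List.flatMap_congr
    intro b hb
    simp only [List.mem_range] at hb
    rw [PySem.List.pyRange_zero_nat, PySem.List.pyRange_zero_nat]
    simp only [List.map_map]
    apply List.map_congr_left
    intro a ha
    simp only [List.mem_range] at ha
    simp only [Function.comp_apply]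
    rw [pv_pair features a b ha (by omega)]
    simp [PySem.List.pyGetD_natCast]

-- ===== VERDICT (by name: the statement is the Claim_ definition above) =====
theorem get_feature_pairs_spec : Claim_equal_get_feature_pairs := by
  intro features _
  unfold Spec_get_feature_pairs
  exact pv_main features
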